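-- pv_equiv track=rewrite | github.com/JieShenAI/keshe | 文件加密传输/文件分割代码/mycode/hammingIO.py | bytes_binintlist
-- ===== SOURCE A (Python) =====
-- def bytes_binintlist(Bytes):
--
--         b_list = []
--         for Byte in Bytes:
--             num = bin(Byte)[2:]
--             # 列表中加前置0
--             for j in range((8-len(num))):
--                 b_list.append(0)
--             # 再添加非0的二进制
--             b_list += [int(n) for n in num]
--         return b_list
-- ===== SOURCE B (Python) =====
-- def bytes_binintlist(Bytes):
--     b_list = []
--     for Byte in Bytes:
--         width = max(Byte.bit_length(), 8)
--         for s in range(width - 1, -1, -1):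
--             b_list.append((Byte >> s) & 1)
--     return b_list
-- ===== Notes on version B (the rewrite author's own statement) =====
-- stated objective: idiomatic
-- what changed: B extracts each byte's bits arithmetically MSB-first with shifts and masks over a single uniform range, instead of A's bin()-string parse plus separate leading-zero padding loop plus per-character int() conversion.
-- outside the precondition, e.g. on bytes_binintlist([-1]): A raises ValueError, B returns [1, 1, 1, 1, 1, 1, 1, 1]
import Mathlib
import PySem

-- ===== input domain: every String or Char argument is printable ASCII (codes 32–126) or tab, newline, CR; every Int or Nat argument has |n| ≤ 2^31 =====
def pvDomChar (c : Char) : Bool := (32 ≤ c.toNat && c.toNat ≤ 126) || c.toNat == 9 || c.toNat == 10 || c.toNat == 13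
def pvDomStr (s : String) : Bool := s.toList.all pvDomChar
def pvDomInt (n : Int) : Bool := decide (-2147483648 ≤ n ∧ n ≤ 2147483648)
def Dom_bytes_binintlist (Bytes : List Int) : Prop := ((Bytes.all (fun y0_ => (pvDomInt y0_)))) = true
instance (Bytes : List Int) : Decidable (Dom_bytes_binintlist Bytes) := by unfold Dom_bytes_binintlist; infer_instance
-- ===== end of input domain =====

-- B replaces A's bin()-string parse + leading-zero padding loop + per-char int() with one
-- uniform MSB-first shift-and-mask extraction per byte (idiomatic; same output on Pre_).

-- ===== PORT A =====
-- bin(m) digits for m : Nat, MSB first ('' for 0; the '0' case is handled by pyBinTail)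
def binCore : Nat → List Char
  | 0 => []
  | (m+1) => binCore ((m+1)/2) ++ [if (m+1) % 2 = 1 then '1' else '0']
decreasing_by exact Nat.div_lt_self (Nat.succ_pos m) (by omega)

-- bin(Byte)[2:] : for Byte ≥ 0 the binary digits; for Byte < 0 Python yields "b" ++ digits
-- (the 'b' survives the [2:] slice of "-0b…"), on which int() later raises — outside Pre_.
def pyBinTail (n : Int) : List Char :=
  let digits := if n.natAbs = 0 then ['0'] else binCore n.natAbs
  if n < 0 then 'b' :: digits else digits

-- int(c) for a one-character string; Python raises on a non-int-literal character
-- (reachable only for Byte < 0, excluded by Pre_), where this total form defaults to 0.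
def charToInt (c : Char) : Int := (PySem.Int.ofChars? [c]).getD 0

def bytes_binintlist (Bytes : List Int) : List Int :=
  Bytes.foldl (fun b_list Byte =>
    let num := pyBinTail Byte
    -- for j in range(8 - len(num)): b_list.append(0)
    let b_list := (PySem.List.pyRange 0 (8 - (num.length : Int)) 1).foldl
      (fun a _ => a ++ [(0 : Int)]) b_list
    -- b_list += [int(n) for n in num]
    b_list ++ num.map charToInt) []

-- ===== PORT B =====
def bytes_binintlist_alt (Bytes : List Int) : List Int :=
  Bytes.foldl (fun b_list Byte =>
    let width : Nat := max (PySem.Int.bitLength Byte) 8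
    (PySem.List.pyRange ((width : Int) - 1) (-1) (-1)).foldl
      (fun a s => a ++ [PySem.Int.band (Byte >>> s.toNat) 1]) b_list) []

-- ===== PRECONDITION & SPEC =====
-- Pre_ excludes negative bytes: there Python A raises ValueError (int('b') on the slice of "-0b…").
def Pre_bytes_binintlist (Bytes : List Int) : Prop := ∀ b ∈ Bytes, 0 ≤ b
instance (Bytes : List Int) : Decidable (Pre_bytes_binintlist Bytes) := by unfold Pre_bytes_binintlist; infer_instance
def pvWitness_bytes_binintlist : List Int := [0, 1, 255, 256, 1000]

def Spec_bytes_binintlist (Bytes : List Int) (out : List Int) : Prop := out = bytes_binintlist_alt Bytes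
instance (Bytes : List Int) (out : List Int) : Decidable (Spec_bytes_binintlist Bytes out) := by unfold Spec_bytes_binintlist; infer_instance

-- ===== CLAIM (what is proved, stated in full; the proofs are below) =====
def Claim_equal_bytes_binintlist : Prop := ∀ (Bytes : List Int), Dom_bytes_binintlist Bytes → Pre_bytes_binintlist Bytes → Spec_bytes_binintlist Bytes (bytes_binintlist Bytes)

-- ===== LEMMAS AND PROOFS =====

-- bits of m, LSB first: [m>>>0 & 1, m>>>1 & 1, …] (as Ints)
def bitsRev (m : Nat) (k : Nat) : List Int :=
  (List.range k).map (fun s => (((m >>> s) % 2 : Nat) : Int))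

lemma charToInt_bit (m : Nat) :
    charToInt (if m % 2 = 1 then '1' else '0') = ((m % 2 : Nat) : Int) := by
  rcases Nat.mod_two_eq_zero_or_one m with h | h <;> rw [h] <;> decide

lemma binCore_bits : ∀ m : Nat, ((binCore m).map charToInt).reverse
    = bitsRev m (PySem.Int.bitLength (m : Int))
  | 0 => by simp [binCore, bitsRev, PySem.Int.bitLength_zero]
  | (m+1) => by
    have ih := binCore_bits ((m+1)/2)
    rw [binCore]
    rw [PySem.Int.bitLength_natCast (Nat.succ_pos m)]
    simp only [List.map_append, List.reverse_append, List.map_cons, List.map_nil,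
      List.reverse_cons, List.reverse_nil, List.nil_append, List.singleton_append]
    rw [ih]
    rw [charToInt_bit (m+1)]
    unfold bitsRev
    rw [List.range_succ_eq_map]
    simp only [List.map_cons, List.map_map]
    refine List.cons_eq_cons.mpr ⟨?_, ?_⟩
    · rw [Nat.shiftRight_zero]
    · apply List.map_congr_left
      intro s _
      simp only [Function.comp]
      congr 1
      rw [Nat.succ_eq_one_add, Nat.shiftRight_add, Nat.shiftRight_one]
decreasing_by exact Nat.div_lt_self (Nat.succ_pos m) (by omega)

lemma binCore_length (m : Nat) : (binCore m).length = PySem.Int.bitLength (m : Int) := by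
  have := congrArg List.length (binCore_bits m)
  simpa [bitsRev] using this

lemma shiftRight_eq_zero_of_bitLength_le (m s : Nat)
    (h : PySem.Int.bitLength (m : Int) ≤ s) : m >>> s = 0 := by
  have hlt : m < 2 ^ PySem.Int.bitLength (m : Int) := by
    simpa using PySem.Int.lt_two_pow_bitLength (m : Int)
  rw [Nat.shiftRight_eq_div_pow]
  exact Nat.div_eq_of_lt (lt_of_lt_of_le hlt (Nat.pow_le_pow_right (by omega) h))

lemma bitsRev_pad (m : Nat) : ∀ k, PySem.Int.bitLength (m : Int) ≤ k →
    bitsRev m k = bitsRev m (PySem.Int.bitLength (m : Int))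
      ++ List.replicate (k - PySem.Int.bitLength (m : Int)) 0 := by
  intro k
  induction k with
  | zero => intro h; simp [Nat.le_zero.mp h]
  | succ k ih =>
    intro h
    rcases Nat.lt_or_ge (PySem.Int.bitLength (m : Int)) (k+1) with hlt | hge
    · have hk : PySem.Int.bitLength (m : Int) ≤ k := by omega
      unfold bitsRev
      rw [List.range_succ, List.map_append]
      have : bitsRev m k ++ [(((m >>> k) % 2 : Nat) : Int)]
          = bitsRev m (PySem.Int.bitLength (m : Int))
            ++ List.replicate (k + 1 - PySem.Int.bitLength (m : Int)) 0 := by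
        rw [ih hk]
        rw [shiftRight_eq_zero_of_bitLength_le m k hk]
        have : k + 1 - PySem.Int.bitLength (m : Int)
            = (k - PySem.Int.bitLength (m : Int)) + 1 := by omega
        rw [this, List.replicate_succ' , List.append_assoc]
        simp
      simpa [bitsRev] using this
    · have : PySem.Int.bitLength (m : Int) = k + 1 := by omega
      simp [this]

lemma band_shift (m s : Nat) :
    PySem.Int.band ((m : Int) >>> ((s : Nat) : Int)) 1 = (((m >>> s) % 2 : Nat) : Int) := by
  rw [Int.shiftRight_natCast, show (1 : Int) = ((1 : Nat) : Int) from rfl,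
    PySem.Int.band_natCast, Nat.and_one_is_mod]

-- the per-byte block of B equals padding zeros followed by the MSB-first digits
lemma blockB_eq (m : Nat) :
    (PySem.List.pyRange ((max (PySem.Int.bitLength (m : Int)) 8 : Nat) - 1) (-1) (-1)).map
      (fun s => PySem.Int.band ((m : Int) >>> s.toNat) 1)
    = List.replicate (max (PySem.Int.bitLength (m : Int)) 8 - PySem.Int.bitLength (m : Int)) 0
      ++ (bitsRev m (PySem.Int.bitLength (m : Int))).reverse := by
  set L := PySem.Int.bitLength (m : Int) with hL
  set w : Nat := max L 8 with hw
  have hrev : PySem.List.pyRange ((w : Nat) - 1) (-1) (-1)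
      = (PySem.List.pyRange 0 ((w : Nat) - 1 + 1) 1).reverse := by
    have := PySem.List.pyRange_neg_one_eq_reverse ((w : Int) - 1) (-1)
    simpa using this
  have hw1 : ((w : Int) - 1 + 1) = (w : Int) := by ring
  rw [hrev, hw1, List.map_reverse]
  have hmap : (PySem.List.pyRange 0 (w : Int) 1).map
      (fun s => PySem.Int.band ((m : Int) >>> s.toNat) 1) = bitsRev m w := by
    rw [PySem.List.pyRange_one]
    simp only [List.map_map]
    unfold bitsRev
    have hwnat : ((w : Int) - 0).toNat = w := by omega
    rw [hwnat]
    apply List.map_congr_left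
    intro s _
    simp only [Function.comp]
    rw [show ((0 : Int) + (s : Nat)).toNat = s by omega]
    exact band_shift m s
  rw [hmap, bitsRev_pad m w (le_max_left _ _), List.reverse_append, List.reverse_replicate]

-- the per-byte block of A (digits part) equals the reversed LSB-first bits
lemma mapA_eq (m : Nat) :
    (pyBinTail (m : Int)).map charToInt
    = if m = 0 then [(0 : Int)] else (bitsRev m (PySem.Int.bitLength (m : Int))).reverse := by
  unfold pyBinTail
  have hnn : ¬ ((m : Int) < 0) := by omega
  rcases Nat.eq_zero_or_pos m with h0 | hpos
  · subst h0; decide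
  · have hne : m ≠ 0 := by omega
    simp only [Int.natAbs_natCast, hne, hnn, if_false]
    rw [← List.reverse_reverse ((binCore m).map charToInt), binCore_bits m]

-- the zero-padding map of A is replicate many zeros
lemma padMap_eq (K : Int) :
    (PySem.List.pyRange 0 K 1).map (fun _ => (0 : Int)) = List.replicate K.toNat 0 := by
  refine List.eq_replicate_iff.mpr ⟨?_, ?_⟩
  · simp [PySem.List.length_pyRange_one]
  · intro b hb
    simp only [List.mem_map] at hb
    obtain ⟨_, _, rfl⟩ := hb
    rfl

-- per-byte steps agree for a nonnegative byte
lemma step_eq (acc : List Int) (n : Int) (hn : 0 ≤ n) :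
    ((PySem.List.pyRange 0 (8 - ((pyBinTail n).length : Int)) 1).foldl
        (fun a _ => a ++ [(0 : Int)]) acc) ++ (pyBinTail n).map charToInt
    = (PySem.List.pyRange ((((max (PySem.Int.bitLength n) 8 : Nat)) : Int) - 1) (-1) (-1)).foldl
        (fun a s => a ++ [PySem.Int.band (n >>> s.toNat) 1]) acc := by
  obtain ⟨m, rfl⟩ := Int.eq_ofNat_of_zero_le hn
  rw [PySem.List.foldl_append_singleton_eq_map, PySem.List.foldl_append_singleton_eq_map,
    blockB_eq m, padMap_eq, mapA_eq]
  have hlen : (pyBinTail (m : Int)).length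
      = if m = 0 then 1 else PySem.Int.bitLength ((m : Nat) : Int) := by
    unfold pyBinTail
    have hnn : ¬ ((m : Int) < 0) := by omega
    rcases Nat.eq_zero_or_pos m with h0 | hpos
    · subst h0; simp
    · have hne : m ≠ 0 := by omega
      simp [hnn, hne, binCore_length]
  rcases Nat.eq_zero_or_pos m with h0 | hpos
  · subst h0
    rw [hlen, if_pos rfl, if_pos rfl, List.append_assoc]
    congr 1
  · have hne : m ≠ 0 := by omega
    rw [hlen, if_neg hne, if_neg hne]
    have h8 : ((8 : Int) - (PySem.Int.bitLength ((m : Nat) : Int) : Int)).toNat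
        = max (PySem.Int.bitLength ((m : Nat) : Int)) 8 - PySem.Int.bitLength ((m : Nat) : Int) := by
      omega
    rw [h8, List.append_assoc]

lemma fold_eq (Bytes : List Int) (hpre : ∀ b ∈ Bytes, 0 ≤ b) : ∀ (acc : List Int),
    Bytes.foldl (fun b_list Byte =>
      ((PySem.List.pyRange 0 (8 - ((pyBinTail Byte).length : Int)) 1).foldl
        (fun a _ => a ++ [(0 : Int)]) b_list) ++ (pyBinTail Byte).map charToInt) acc
    = Bytes.foldl (fun b_list Byte =>
        (PySem.List.pyRange ((((max (PySem.Int.bitLength Byte) 8 : Nat)) : Int) - 1) (-1) (-1)).foldl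
          (fun a s => a ++ [PySem.Int.band (Byte >>> s.toNat) 1]) b_list) acc := by
  induction Bytes with
  | nil => intro acc; rfl
  | cons x xs ih =>
    intro acc
    simp only [List.foldl_cons]
    rw [step_eq acc x (hpre x (by simp))]
    exact ih (fun b hb => hpre b (by simp [hb])) _

-- ===== VERDICT (by name: the statement is the Claim_ definition above) =====
theorem bytes_binintlist_spec : Claim_equal_bytes_binintlist := by
  intro Bytes _ hpre
  unfold Spec_bytes_binintlist bytes_binintlist bytes_binintlist_alt
  exact fold_eq Bytes hpre []
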